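-- pv_equiv track=rewrite | github.com/remesam23/envault | envault/merge.py | merge_summary
-- ===== SOURCE A (Python) =====
-- from typing import Dict, Literal
--
-- def merge_summary(
--     base: Dict[str, str],
--     incoming: Dict[str, str],
--     merged: Dict[str, str],
-- ) -> Dict[str, list[str]]:
--     """Return a summary dict with keys 'added', 'overwritten', 'skipped'."""
--     added = [k for k in incoming if k not in base]
--     overwritten = [
--         k for k in incoming if k in base and merged[k] == incoming[k] and base[k] != incoming[k]
--     ]
--     skipped = [
--         k for k in incoming if k in base and merged[k] == base[k] and base[k] != incoming[k]
--     ]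
--     return {"added": added, "overwritten": overwritten, "skipped": skipped}
-- ===== SOURCE B (Python) =====
-- def merge_summary(base, incoming, merged):
--     def go(items):
--         # recursion over the item list, building the three lists back-to-front
--         if not items:
--             return [], [], []
--         (k, v) = items[0]
--         added, over, skip = go(items[1:])
--         if k not in base:
--             return [k] + added, over, skip
--         bv = base[k]
--         if bv == v:
--             return added, over, skip
--         mv = merged[k]
--         if mv == v:
--             return added, [k] + over, skip
--         if mv == bv:
--             return added, over, [k] + skip
--         return added, over, skip
--     a, o, s = go(list(incoming.items()))
--     return {"added": a, "overwritten": o, "skipped": s}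
-- ===== Notes on version B (the rewrite author's own statement) =====
-- stated objective: alternative
-- what changed: Replace A's three independent filtering comprehensions by a structural recursion over incoming's item list that classifies each key once and builds all three lists back-to-front by prepending as the recursion unwinds.
import Mathlib
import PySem

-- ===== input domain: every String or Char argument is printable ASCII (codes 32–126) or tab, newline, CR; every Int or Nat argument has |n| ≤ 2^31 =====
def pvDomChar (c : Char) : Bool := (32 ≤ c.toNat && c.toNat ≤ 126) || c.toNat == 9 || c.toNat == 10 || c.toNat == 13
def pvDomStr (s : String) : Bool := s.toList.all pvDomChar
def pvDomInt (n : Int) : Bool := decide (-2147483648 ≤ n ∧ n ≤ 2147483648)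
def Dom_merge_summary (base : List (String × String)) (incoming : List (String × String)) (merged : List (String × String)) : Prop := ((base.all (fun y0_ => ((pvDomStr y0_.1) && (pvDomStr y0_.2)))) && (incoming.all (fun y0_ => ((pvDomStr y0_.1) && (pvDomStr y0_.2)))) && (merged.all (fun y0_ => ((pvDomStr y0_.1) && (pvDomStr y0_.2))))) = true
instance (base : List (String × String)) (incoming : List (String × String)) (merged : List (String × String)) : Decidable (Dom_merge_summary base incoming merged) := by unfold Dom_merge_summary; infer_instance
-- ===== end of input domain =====

-- B is a structural recursion over incoming's item list classifying each key once and
-- prepending (back-to-front) into the three lists, instead of A's three comprehension scans.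

-- ===== PORT A =====
def merge_summary (base : List (String × String)) (incoming : List (String × String)) (merged : List (String × String)) : List (String × List String) :=
  let b := PySem.Dict.ofList base
  let inc := PySem.Dict.ofList incoming
  let m := PySem.Dict.ofList merged
  -- merged[k] / base[k] / incoming[k] are getD under Pre_ (Pre_ guarantees the key is present; KeyError inputs are excluded)
  let added := inc.keys.filter (fun k => !(b.contains k))
  let overwritten := inc.keys.filter (fun k =>
    b.contains k && (m.getD k "" == inc.getD k "") && !(b.getD k "" == inc.getD k ""))
  let skipped := inc.keys.filter (fun k =>
    b.contains k && (m.getD k "" == b.getD k "") && !(b.getD k "" == inc.getD k ""))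
  [("added", added), ("overwritten", overwritten), ("skipped", skipped)]

-- ===== PORT B =====
-- recursive helper 'go' of Source B, step for step (getD = dict indexing, safe under Pre_)
def msGo (b m : PySem.Dict String String) : List (String × String) → List String × List String × List String
  | [] => ([], [], [])
  | (k, v) :: rest =>
    let r := msGo b m rest
    if !(b.contains k) then (k :: r.1, r.2.1, r.2.2)
    else
      let bv := b.getD k ""
      if bv = v then r
      else
        let mv := m.getD k ""
        if mv = v then (r.1, k :: r.2.1, r.2.2)
        else if mv = bv then (r.1, r.2.1, k :: r.2.2)
        else r

def merge_summary_alt (base : List (String × String)) (incoming : List (String × String)) (merged : List (String × String)) : List (String × List String) :=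
  let b := PySem.Dict.ofList base
  let inc := PySem.Dict.ofList incoming
  let m := PySem.Dict.ofList merged
  let r := msGo b m inc.items
  [("added", r.1), ("overwritten", r.2.1), ("skipped", r.2.2)]

-- ===== PRECONDITION & SPEC =====
-- Pre_ excludes exactly the inputs where A raises KeyError: a key present in both incoming and base but absent from merged.
def Pre_merge_summary (base : List (String × String)) (incoming : List (String × String)) (merged : List (String × String)) : Prop :=
  ∀ k ∈ incoming.map Prod.fst, k ∈ base.map Prod.fst → k ∈ merged.map Prod.fst
instance (base : List (String × String)) (incoming : List (String × String)) (merged : List (String × String)) : Decidable (Pre_merge_summary base incoming merged) := by unfold Pre_merge_summary; infer_instance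

def pvWitness_merge_summary : (List (String × String)) × (List (String × String)) × (List (String × String)) :=
  ([("a", "1"), ("b", "2")], [("a", "9"), ("c", "3"), ("b", "2")], [("a", "9"), ("b", "2"), ("c", "3")])

def Spec_merge_summary (base : List (String × String)) (incoming : List (String × String)) (merged : List (String × String)) (out : List (String × List String)) : Prop := out = merge_summary_alt base incoming merged
instance (base : List (String × String)) (incoming : List (String × String)) (merged : List (String × String)) (out : List (String × List String)) : Decidable (Spec_merge_summary base incoming merged out) := by unfold Spec_merge_summary; infer_instance

-- ===== CLAIM (what is proved, stated in full; the proofs are below) =====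
def Claim_equal_merge_summary : Prop := ∀ (base : List (String × String)) (incoming : List (String × String)) (merged : List (String × String)), Dom_merge_summary base incoming merged → Pre_merge_summary base incoming merged → Spec_merge_summary base incoming merged (merge_summary base incoming merged)

-- ===== LEMMAS AND PROOFS =====
lemma pv_msGo_eq (b m inc : PySem.Dict String String)
    (l : List (String × String)) (h : ∀ p ∈ l, inc.getD p.1 "" = p.2) :
    msGo b m l
    = ((l.map Prod.fst).filter (fun k => !(b.contains k)),
       (l.map Prod.fst).filter (fun k =>
         b.contains k && (m.getD k "" == inc.getD k "") && !(b.getD k "" == inc.getD k "")),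
       (l.map Prod.fst).filter (fun k =>
         b.contains k && (m.getD k "" == b.getD k "") && !(b.getD k "" == inc.getD k ""))) := by
  induction l with
  | nil => simp [msGo]
  | cons p t ih =>
    obtain ⟨k, v⟩ := p
    have hv : inc.getD k "" = v := h (k, v) (by simp)
    have ht : ∀ p ∈ t, inc.getD p.1 "" = p.2 := fun p hp => h p (by simp [hp])
    rw [msGo, ih ht]
    simp only [List.map_cons, List.filter_cons, hv]
    by_cases hc : b.contains k
    · by_cases hbv : b.getD k "" = v
      · simp [hc, hbv]
      · by_cases hmv : m.getD k "" = v
        · have hvb : ¬ v = b.getD k "" := fun e => hbv e.symm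
          simp [hc, hbv, hmv, hvb]
        · by_cases hmb : m.getD k "" = b.getD k ""
          · simp [hc, hbv, hmb]
          · simp [hc, hbv, hmv, hmb]
    · simp [hc]

-- ===== VERDICT (by name: the statement is the Claim_ definition above) =====
theorem merge_summary_spec : Claim_equal_merge_summary := by
  intro base incoming merged _ _
  unfold Spec_merge_summary merge_summary merge_summary_alt
  dsimp only []
  have hnd := PySem.Dict.nodup_keys_ofList (κ := String) (ν := String) incoming
  have h : ∀ p ∈ (PySem.Dict.ofList incoming).items,
      (PySem.Dict.ofList incoming).getD p.1 "" = p.2 := by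
    intro p hp
    obtain ⟨k, v⟩ := p
    exact PySem.Dict.getD_of_mem_items _ hp hnd ""
  rw [pv_msGo_eq (PySem.Dict.ofList base) (PySem.Dict.ofList merged)
      (PySem.Dict.ofList incoming) _ h]
  simp [PySem.Dict.keys]
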